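-- pv_equiv track=rewrite | github.com/tommasoderossi7/SPAR | utils/utils.py | split_solution_into_chunks
-- ===== SOURCE A (Python) =====
-- from typing import List, Tuple, Optional, Dict, Any
--
-- def split_solution_into_chunks(solution_text: str) -> List[str]:
--     """
--     Split a solution into chunks for rollout generation.
--
--     Args:
--         solution_text: The full solution text
--
--     Returns:
--         List of chunks
--     """
--     # First, remove the prompt part if present
--     if "<think>" in solution_text:
--         solution_text = solution_text.split("<think>")[1].strip()
--
--     # Remove the closing tag if present
--     if "</think>" in solution_text:
--         solution_text = solution_text.split("</think>")[0].strip()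
--
--     # Define patterns for chunk boundaries
--     sentence_ending_tokens = [".", "?", "!"]
--     paragraph_ending_patterns = ["\n\n", "\r\n\r\n"]
--
--     # Split the text into chunks
--     chunks = []
--     current_chunk = ""
--
--     # Process the text character by character
--     i = 0
--     while i < len(solution_text):
--         current_chunk += solution_text[i]
--
--         # Check for paragraph endings
--         is_paragraph_end = False
--         for pattern in paragraph_ending_patterns:
--             if (
--                 i + len(pattern) <= len(solution_text)
--                 and solution_text[i : i + len(pattern)] == pattern
--             ):
--                 is_paragraph_end = True
--                 break
--
--         # Check for sentence endings followed by space or newline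
--         is_sentence_end = False
--         if i < len(solution_text) - 1 and solution_text[i] in sentence_ending_tokens:
--             next_char = solution_text[i + 1]
--             if next_char == " " or next_char == "\n":
--                 is_sentence_end = True
--
--         # If we found a boundary, add the chunk and reset
--         if is_paragraph_end or is_sentence_end:
--             if current_chunk.strip():
--                 chunks.append(current_chunk.strip())
--                 current_chunk = ""
--
--         i += 1
--
--     # # Add the last chunk if not empty
--     # if current_chunk.strip():
--     #     chunks.append(current_chunk.strip())
--     #     chunk_idxs.append(len(solution_text) - 1)  # Add last index
--
--     # Merge small chunks (less than 10 characters)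
--     i = 0
--     while i < len(chunks):
--         if len(chunks[i]) < 10:
--             # If this is the last chunk, merge with previous chunk if possible
--             if i == len(chunks) - 1:
--                 if i > 0:
--                     chunks[i - 1] = chunks[i - 1] + " " + chunks[i]
--                     chunks.pop(i)
--             # Otherwise merge with the next chunk
--             else:
--                 chunks[i + 1] = chunks[i] + " " + chunks[i + 1]
--                 chunks.pop(i)
--                 # Don't increment i since we need to check the new merged chunk
--             # If we're at the beginning and there's only one chunk, just keep it
--             if i == 0 and len(chunks) == 1:
--                 break
--         else:
--             i += 1
--
--     # chunk_boundaries = [(chunk_idxs[i], chunk_idxs[i + 1]) for i in range(len(chunk_idxs) - 1)]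
--     # chunk_boundaries.append((chunk_idxs[-1], len(solution_text)))
--
--     # if get_idxs:
--     #     return chunks, chunk_boundaries
--     # else:
--     return chunks
-- ===== SOURCE B (Python) =====
-- def split_solution_into_chunks(solution_text):
--     if "<think>" in solution_text:
--         solution_text = solution_text.split("<think>")[1].strip()
--     if "</think>" in solution_text:
--         solution_text = solution_text.split("</think>")[0].strip()
--
--     n = len(solution_text)
--
--     def is_boundary(i):
--         if solution_text[i:i + 2] == "\n\n" or solution_text[i:i + 4] == "\r\n\r\n":
--             return True
--         return (i < n - 1
--                 and solution_text[i] in ".?!"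
--                 and solution_text[i + 1] in (" ", "\n"))
--
--     # Split phase: slice at boundary positions instead of growing a chunk char by char.
--     chunks = []
--     start = 0
--     for i in range(n):
--         if is_boundary(i):
--             piece = solution_text[start:i + 1].strip()
--             if piece:
--                 chunks.append(piece)
--             start = i + 1
--
--     # Merge phase: one forward accumulation pass instead of the in-place pop/rewind loop.
--     out = []
--     cur = None
--     for c in chunks:
--         cur = c if cur is None else cur + " " + c
--         if len(cur) >= 10:
--             out.append(cur)
--             cur = None
--     if cur is not None:
--         if out:
--             out[-1] = out[-1] + " " + cur
--         else:
--             out = [cur]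
--     return out
-- ===== Notes on version B (the rewrite author's own statement) =====
-- stated objective: alternative
-- what changed: The split phase records boundary indices and slices the text at them instead of growing a chunk character by character, and the small-chunk merge is a single forward accumulation pass (accumulate until length >= 10, fold a short trailing group into the last emitted chunk) instead of A's in-place pop-with-rewind loop over the chunk list.
import Mathlib
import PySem

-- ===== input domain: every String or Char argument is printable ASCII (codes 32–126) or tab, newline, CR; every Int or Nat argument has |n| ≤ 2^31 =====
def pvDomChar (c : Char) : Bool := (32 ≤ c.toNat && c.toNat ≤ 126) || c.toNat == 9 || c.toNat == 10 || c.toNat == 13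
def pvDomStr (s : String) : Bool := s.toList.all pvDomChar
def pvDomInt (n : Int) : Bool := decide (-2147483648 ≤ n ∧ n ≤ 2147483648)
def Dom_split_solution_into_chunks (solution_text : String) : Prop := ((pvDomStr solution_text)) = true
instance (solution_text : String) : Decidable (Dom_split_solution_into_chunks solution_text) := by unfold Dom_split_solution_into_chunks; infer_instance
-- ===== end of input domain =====

-- B replaces A's char-by-char chunk growing by slicing at boundary indices and A's
-- in-place pop-with-rewind small-chunk merge by a single forward accumulation pass
-- (objective: alternative decomposition, same exact behaviour).

-- ===== PORT A =====

-- "<think>"/"</think>" preprocessing (both Pythons share these lines verbatim).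
-- Python's `split(sep)[1]` is guarded by `sep in s`, so the list always has ≥ 2 parts;
-- the `.getD` defaults are never used under that guard.
def pvPreA (cs : List Char) : List Char :=
  let cs :=
    if PySem.Chars.isIn "<think>".toList cs then
      PySem.Chars.strip (((PySem.Chars.split? cs "<think>".toList).getD []).getD 1 [])
    else cs
  if PySem.Chars.isIn "</think>".toList cs then
    PySem.Chars.strip (((PySem.Chars.split? cs "</think>".toList).getD []).getD 0 [])
  else cs

-- the `while i < len(solution_text)` loop of A: state (i, chunks, current_chunk)
def pvScanA (cs : List Char) (i : Nat) (chunks : List (List Char)) (cur : List Char) :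
    List (List Char) :=
  if h : i < cs.length then
    let cur2 := cur ++ [cs[i]'h]
    let isPara : Bool :=
      (decide (i + 2 ≤ cs.length) &&
        (PySem.List.slice cs (some (i : Int)) (some ((i : Int) + 2)) == "\n\n".toList)) ||
      (decide (i + 4 ≤ cs.length) &&
        (PySem.List.slice cs (some (i : Int)) (some ((i : Int) + 4)) == "\r\n\r\n".toList))
    let isSent : Bool :=
      decide (i < cs.length - 1) && ['.', '?', '!'].contains (cs[i]'h) &&
        ((PySem.List.pyGet? cs ((i : Int) + 1) == some ' ') ||
         (PySem.List.pyGet? cs ((i : Int) + 1) == some '\n'))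
    if isPara || isSent then
      if PySem.Chars.strip cur2 ≠ [] then
        pvScanA cs (i + 1) (chunks ++ [PySem.Chars.strip cur2]) []
      else pvScanA cs (i + 1) chunks cur2
    else pvScanA cs (i + 1) chunks cur2
  else chunks
termination_by cs.length - i

-- the `while i < len(chunks)` small-chunk merge loop of A (pop with rewind)
def pvMergeA (chunks : List (List Char)) (i : Nat) : List (List Char) :=
  if h : i < chunks.length then
    if (chunks[i]'h).length < 10 then
      if i = chunks.length - 1 then
        if 0 < i then
          let c2 := (chunks.set (i - 1) (chunks.getD (i - 1) [] ++ [' '] ++ chunks[i]'h)).eraseIdx i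
          -- `if i == 0 and len(chunks) == 1: break` cannot fire here (i > 0); loop re-tests i
          pvMergeA c2 i
        else chunks  -- i = 0 and it is the last chunk: the `break` keeps the lone chunk
      else
        let c2 := (chunks.set (i + 1) (chunks[i]'h ++ [' '] ++ chunks.getD (i + 1) [])).eraseIdx i
        if i = 0 ∧ c2.length = 1 then c2 else pvMergeA c2 i
    else pvMergeA chunks (i + 1)
  else chunks
termination_by chunks.length - i
decreasing_by
  · simp_all [List.length_eraseIdx]; split <;> omega
  · simp_all [List.length_eraseIdx]; omega
  · omega

def split_solution_into_chunks (solution_text : String) : List String :=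
  let cs := pvPreA solution_text.toList
  (pvMergeA (pvScanA cs 0 [] []) 0).map String.ofList

-- ===== PORT B =====

def pvPreB (cs : List Char) : List Char :=
  let cs :=
    if PySem.Chars.isIn "<think>".toList cs then
      PySem.Chars.strip (((PySem.Chars.split? cs "<think>".toList).getD []).getD 1 [])
    else cs
  if PySem.Chars.isIn "</think>".toList cs then
    PySem.Chars.strip (((PySem.Chars.split? cs "</think>".toList).getD []).getD 0 [])
  else cs

-- Source B's `is_boundary(i)` (only called with i < cs.length; the getD default is never used there)
def pvBoundary (cs : List Char) (i : Nat) : Bool :=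
  if (PySem.List.slice cs (some (i : Int)) (some ((i : Int) + 2)) == "\n\n".toList) ||
     (PySem.List.slice cs (some (i : Int)) (some ((i : Int) + 4)) == "\r\n\r\n".toList) then
    true
  else
    decide (i < cs.length - 1) && ['.', '?', '!'].contains (cs.getD i ' ') &&
      ((PySem.List.pyGet? cs ((i : Int) + 1) == some ' ') ||
       (PySem.List.pyGet? cs ((i : Int) + 1) == some '\n'))

-- Source B's split phase: `for i in range(n)` with state (chunks, start), slicing at boundaries
def pvSplitB (cs : List Char) : List (List Char) :=
  ((List.range cs.length).foldl
    (fun (st : List (List Char) × Nat) i =>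
      if pvBoundary cs i then
        let piece :=
          PySem.Chars.strip (PySem.List.slice cs (some (st.2 : Int)) (some ((i : Int) + 1)))
        (if piece ≠ [] then st.1 ++ [piece] else st.1, i + 1)
      else st)
    ([], 0)).1

-- Source B's merge phase: one forward pass with state (out, cur)
def pvStepB (st : List (List Char) × Option (List Char)) (c : List Char) :
    List (List Char) × Option (List Char) :=
  let cur := match st.2 with | none => c | some p => p ++ [' '] ++ c
  if 10 ≤ cur.length then (st.1 ++ [cur], none) else (st.1, some cur)

def pvFinalize (st : List (List Char) × Option (List Char)) : List (List Char) :=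
  match st.2 with
  | none => st.1
  | some c =>
    match st.1 with
    | [] => [c]
    | _ :: _ => st.1.dropLast ++ [st.1.getLast! ++ [' '] ++ c]

def pvMergeB (chunks : List (List Char)) : List (List Char) :=
  pvFinalize (chunks.foldl pvStepB ([], none))

def split_solution_into_chunks_alt (solution_text : String) : List String :=
  let cs := pvPreB solution_text.toList
  (pvMergeB (pvSplitB cs)).map String.ofList

-- ===== PRECONDITION & SPEC =====
def Spec_split_solution_into_chunks (solution_text : String) (out : List String) : Prop := out = split_solution_into_chunks_alt solution_text
instance (solution_text : String) (out : List String) : Decidable (Spec_split_solution_into_chunks solution_text out) := by unfold Spec_split_solution_into_chunks; infer_instance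

-- ===== CLAIM (what is proved, stated in full; the proofs are below) =====
def Claim_equal_split_solution_into_chunks : Prop := ∀ (solution_text : String), Dom_split_solution_into_chunks solution_text → Spec_split_solution_into_chunks solution_text (split_solution_into_chunks solution_text)

-- ===== LEMMAS AND PROOFS =====

-- strip facts ----------------------------------------------------------------

lemma pv_strip_append_space (w t : List Char)
    (h : ∀ c ∈ w, PySem.Chars.isspace c = true) :
    PySem.Chars.strip (w ++ t) = PySem.Chars.strip t := by
  unfold PySem.Chars.strip PySem.Chars.lstrip
  rw [List.dropWhile_append]
  simp [List.dropWhile_eq_nil_iff.2 h]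

lemma pv_allspace_of_strip_eq_nil (x : List Char) (h : PySem.Chars.strip x = []) :
    ∀ c ∈ x, PySem.Chars.isspace c = true := by
  unfold PySem.Chars.strip PySem.Chars.rstrip PySem.Chars.lstrip at h
  rw [List.reverse_eq_nil_iff, List.dropWhile_eq_nil_iff] at h
  intro c hc
  rw [← List.takeWhile_append_dropWhile (p := PySem.Chars.isspace) (l := x),
    List.mem_append] at hc
  rcases hc with hc | hc
  · exact List.mem_takeWhile_imp hc
  · exact h c (List.mem_reverse.2 hc)

-- split phase ----------------------------------------------------------------

-- recursive form of Source B's split loop (proof helper)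
def pvBGo (cs : List Char) (i start : Nat) (chunks : List (List Char)) : List (List Char) :=
  if i < cs.length then
    if pvBoundary cs i then
      let piece :=
        PySem.Chars.strip (PySem.List.slice cs (some (start : Int)) (some ((i : Int) + 1)))
      pvBGo cs (i + 1) (i + 1) (if piece ≠ [] then chunks ++ [piece] else chunks)
    else pvBGo cs (i + 1) start chunks
  else chunks
termination_by cs.length - i

lemma pv_range_fold_bgo (cs : List Char) :
    ∀ k i start chunks, i ≤ cs.length → cs.length - i = k →
      ((List.range' i k).foldl
        (fun (st : List (List Char) × Nat) j =>
          if pvBoundary cs j then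
            let piece :=
              PySem.Chars.strip (PySem.List.slice cs (some (st.2 : Int)) (some ((j : Int) + 1)))
            (if piece ≠ [] then st.1 ++ [piece] else st.1, j + 1)
          else st)
        (chunks, start)).1 = pvBGo cs i start chunks := by
  intro k
  induction k with
  | zero =>
    intro i start chunks hi hk
    rw [pvBGo]
    simp only [List.range'_zero, List.foldl_nil]
    rw [if_neg (show ¬ i < cs.length by omega)]
  | succ k ih =>
    intro i start chunks hi hk
    have hlt : i < cs.length := by omega
    rw [pvBGo, List.range'_succ, List.foldl_cons, if_pos hlt]
    by_cases hb : pvBoundary cs i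
    · simp only [hb, if_true]
      exact ih (i + 1) _ _ (by omega) (by omega)
    · simp only [hb, if_false, Bool.false_eq_true]
      exact ih (i + 1) start chunks (by omega) (by omega)

lemma pv_splitB_eq_bgo (cs : List Char) : pvSplitB cs = pvBGo cs 0 0 [] := by
  unfold pvSplitB
  rw [List.range_eq_range']
  exact pv_range_fold_bgo cs cs.length 0 0 [] (Nat.zero_le _) rfl

lemma pv_slice_len (cs : List Char) (i m : Nat) :
    (PySem.List.slice cs (some (i : Int)) (some ((i : Int) + (m : Int)))).length
      = min (i + m) cs.length - min i cs.length := by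
  have h : ((i : Int) + (m : Int)) = (((i + m : Nat)) : Int) := by push_cast; ring
  rw [h, PySem.List.length_slice, PySem.List.clampIdx_natCast, PySem.List.clampIdx_natCast]

lemma pv_boundaryA_eq (cs : List Char) (i : Nat) (h : i < cs.length) :
    (((decide (i + 2 ≤ cs.length) &&
        (PySem.List.slice cs (some (i : Int)) (some ((i : Int) + 2)) == "\n\n".toList)) ||
      (decide (i + 4 ≤ cs.length) &&
        (PySem.List.slice cs (some (i : Int)) (some ((i : Int) + 4)) == "\r\n\r\n".toList))) ||
      (decide (i < cs.length - 1) && ['.', '?', '!'].contains (cs[i]'h) &&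
        ((PySem.List.pyGet? cs ((i : Int) + 1) == some ' ') ||
         (PySem.List.pyGet? cs ((i : Int) + 1) == some '\n')))) = pvBoundary cs i := by
  have h2 : (PySem.List.slice cs (some (i : Int)) (some ((i : Int) + 2)) == "\n\n".toList) = true
      → i + 2 ≤ cs.length := by
    intro he
    have hl := congrArg List.length (eq_of_beq he)
    rw [show ((2:Int) = ((2:Nat):Int)) from rfl, pv_slice_len,
      show ("\n\n".toList).length = 2 from rfl] at hl
    omega
  have h4 : (PySem.List.slice cs (some (i : Int)) (some ((i : Int) + 4)) == "\r\n\r\n".toList) = true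
      → i + 4 ≤ cs.length := by
    intro he
    have hl := congrArg List.length (eq_of_beq he)
    rw [show ((4:Int) = ((4:Nat):Int)) from rfl, pv_slice_len,
      show ("\r\n\r\n".toList).length = 4 from rfl] at hl
    omega
  unfold pvBoundary
  rw [List.getD_eq_getElem _ _ h]
  cases hb2 : (PySem.List.slice cs (some (i : Int)) (some ((i : Int) + 2)) == "\n\n".toList) with
  | true => simp [h2 hb2]
  | false =>
    cases hb4 : (PySem.List.slice cs (some (i : Int)) (some ((i : Int) + 4)) == "\r\n\r\n".toList) with
    | true => simp [h4 hb4]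
    | false => simp

lemma pv_scanA_eq_bgo (cs : List Char) :
    ∀ k i start chunks w, cs.length - i = k → start ≤ i → i ≤ cs.length →
    (∀ c ∈ w, PySem.Chars.isspace c = true) →
    pvScanA cs i chunks (w ++ (cs.drop start).take (i - start)) = pvBGo cs i start chunks := by
  intro k
  induction k with
  | zero =>
    intro i start chunks w hk hsi hi hw
    rw [pvScanA, pvBGo, dif_neg (show ¬ i < cs.length by omega),
      if_neg (show ¬ i < cs.length by omega)]
  | succ k ih =>
    intro i start chunks w hk hsi hi hw
    have hlt : i < cs.length := by omega
    have hseg : (cs.drop start).take (i - start) ++ [cs[i]'hlt]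
        = (cs.drop start).take (i + 1 - start) := by
      have hlen : i - start < (cs.drop start).length := by
        rw [List.length_drop]; omega
      rw [show i + 1 - start = (i - start) + 1 by omega, List.take_add_one,
        List.getElem?_drop, show start + (i - start) = i by omega,
        List.getElem?_eq_getElem hlt]
      rfl
    have hslice : PySem.List.slice cs (some (start : Int)) (some ((i : Int) + 1))
        = (cs.drop start).take (i + 1 - start) := by
      rw [show ((i : Int) + 1) = (((i + 1 : Nat)) : Int) by push_cast; ring,
        PySem.List.slice_natCast]
    rw [pvScanA, pvBGo, dif_pos hlt, if_pos hlt]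
    simp only [List.append_assoc, hseg, pv_boundaryA_eq cs i hlt]
    by_cases hb : pvBoundary cs i
    · rw [if_pos hb, if_pos hb]
      have hstrip : PySem.Chars.strip (w ++ (cs.drop start).take (i + 1 - start))
          = PySem.Chars.strip ((cs.drop start).take (i + 1 - start)) :=
        pv_strip_append_space _ _ hw
      rw [hslice, hstrip]
      by_cases hp : PySem.Chars.strip ((cs.drop start).take (i + 1 - start)) = []
      · rw [if_neg (by simpa using hp), if_neg (by simpa using hp)]
        have := ih (i + 1) (i + 1) chunks (w ++ (cs.drop start).take (i + 1 - start))
          (by omega) (le_refl _) (by omega)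
          (by
            intro c hc
            rcases List.mem_append.1 hc with hc | hc
            · exact hw c hc
            · exact pv_allspace_of_strip_eq_nil _ (hstrip.trans hp) c
                (List.mem_append.2 (Or.inr hc)))
        simpa using this
      · rw [if_pos (by simpa using hp), if_pos (by simpa using hp)]
        have := ih (i + 1) (i + 1)
          (chunks ++ [PySem.Chars.strip ((cs.drop start).take (i + 1 - start))]) []
          (by omega) (le_refl _) (by omega) (by simp)
        simpa using this
    · rw [if_neg hb, if_neg hb]
      exact ih (i + 1) start chunks w (by omega) (by omega) (by omega) hw

-- merge phase ----------------------------------------------------------------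

-- mediating recursion between A's rewind loop and B's fold (proof helper)
def pvMCore (done : List (List Char)) (cur : List Char) (rest : List (List Char)) :
    List (List Char) :=
  if cur.length < 10 then
    match rest with
    | [] =>
      match done with
      | [] => [cur]
      | _ :: _ => done.dropLast ++ [done.getLast! ++ [' '] ++ cur]
    | r :: rs => pvMCore done (cur ++ [' '] ++ r) rs
  else
    match rest with
    | [] => done ++ [cur]
    | r :: rs => pvMCore (done ++ [cur]) r rs

lemma pv_set_last (l : List (List Char)) (x : List Char) (h : l ≠ []) :
    l.set (l.length - 1) x = l.dropLast ++ [x] := by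
  induction l with
  | nil => simp at h
  | cons a t ih =>
    cases t with
    | nil => simp
    | cons b t' =>
      have ht := ih (by simp)
      simp only [List.length_cons, Nat.add_sub_cancel] at ht ⊢
      rw [List.set_cons_succ, ht]
      simp [List.dropLast_cons_of_ne_nil]

lemma pv_getLast_bang (l : List (List Char)) :
    l.getLast! = l.getD (l.length - 1) [] := by
  rw [List.getLast!_eq_getLast?_getD, List.getLast?_eq_getElem?, List.getD_eq_getElem?_getD]
  rfl

lemma pv_mergeA_eq_core :
    ∀ (rest done : List (List Char)) (cur : List Char),
      pvMergeA (done ++ cur :: rest) done.length = pvMCore done cur rest := by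
  intro rest
  induction rest with
  | nil =>
    intro done cur
    rw [pvMergeA, pvMCore.eq_def]
    rw [dif_pos (show done.length < (done ++ [cur]).length by simp)]
    rw [List.getElem_append_right (Nat.le_refl _)]
    simp only [Nat.sub_self, List.getElem_cons_zero]
    by_cases hc : cur.length < 10
    · simp only [if_pos hc]
      rw [if_pos (show done.length = (done ++ [cur]).length - 1 by simp)]
      by_cases hd : done = []
      · subst hd
        simp
      · have hdl : 0 < done.length := List.length_pos_of_ne_nil hd
        rw [if_pos hdl]
        have e1 : (done ++ [cur]).getD (done.length - 1) [] = done.getLast! := by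
          rw [List.getD_append _ _ _ _ (by omega), pv_getLast_bang]
        have e2 : (done ++ [cur]).set (done.length - 1) (done.getLast! ++ [' '] ++ cur)
            = (done.dropLast ++ [done.getLast! ++ [' '] ++ cur]) ++ [cur] := by
          rw [List.set_append_left _ _ (by omega), pv_set_last _ _ hd]
        have e3 : ((done.dropLast ++ [done.getLast! ++ [' '] ++ cur]) ++ [cur]).eraseIdx
            done.length = done.dropLast ++ [done.getLast! ++ [' '] ++ cur] := by
          rw [List.eraseIdx_append_of_length_le (by simp; omega)]
          simp
          omega
        simp only [e1, e2, e3]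
        rw [pvMergeA, dif_neg (by simp; omega)]
        cases done with
        | nil => simp at hd
        | cons d ds => rfl
    · simp only [if_neg hc]
      rw [pvMergeA, dif_neg (by simp)]
  | cons r rs ih =>
    intro done cur
    rw [pvMergeA, pvMCore.eq_def]
    rw [dif_pos (show done.length < (done ++ cur :: r :: rs).length by simp)]
    rw [List.getElem_append_right (Nat.le_refl _)]
    simp only [Nat.sub_self, List.getElem_cons_zero]
    by_cases hc : cur.length < 10
    · simp only [if_pos hc]
      rw [if_neg (show ¬ done.length = (done ++ cur :: r :: rs).length - 1 by simp)]
      have e1 : (done ++ cur :: r :: rs).getD (done.length + 1) [] = r := by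
        rw [List.getD_eq_getElem?_getD, List.getElem?_append_right (by omega)]
        simp
      have e2 : (done ++ cur :: r :: rs).set (done.length + 1) (cur ++ [' '] ++ r)
          = done ++ cur :: (cur ++ [' '] ++ r) :: rs := by
        rw [List.set_append_right _ _ (by omega)]
        simp
      have e3 : (done ++ cur :: (cur ++ [' '] ++ r) :: rs).eraseIdx done.length
          = done ++ (cur ++ [' '] ++ r) :: rs := by
        rw [List.eraseIdx_append_of_length_le (Nat.le_refl _)]
        simp
      simp only [e1, e2, e3]
      by_cases hz : done.length = 0 ∧ (done ++ (cur ++ [' '] ++ r) :: rs).length = 1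
      · rw [if_pos hz]
        have hd : done = [] := List.length_eq_zero_iff.1 hz.1
        have hrs : rs = [] := by
          have h2 := hz.2
          rw [hd] at h2
          simpa using h2
        subst hd; subst hrs
        rw [pvMCore.eq_def]
        split <;> simp
      · rw [if_neg hz]
        exact ih done (cur ++ [' '] ++ r)
    · simp only [if_neg hc]
      have hre : done ++ cur :: r :: rs = (done ++ [cur]) ++ r :: rs := by simp
      rw [hre, show done.length + 1 = (done ++ [cur]).length by simp]
      exact ih (done ++ [cur]) r

lemma pv_core_eq_fold :
    ∀ (rest done : List (List Char)) (cur : List Char),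
      pvMCore done cur rest = pvFinalize (List.foldl pvStepB (done, none) (cur :: rest)) := by
  intro rest
  induction rest with
  | nil =>
    intro done cur
    rw [pvMCore.eq_def]
    simp only [List.foldl_cons, List.foldl_nil, pvStepB]
    by_cases hc : cur.length < 10
    · rw [if_pos hc, if_neg (by omega)]
      cases done with
      | nil => rfl
      | cons d ds => rfl
    · rw [if_neg hc, if_pos (by omega)]
      rfl
  | cons r rs ih =>
    intro done cur
    rw [pvMCore.eq_def]
    by_cases hc : cur.length < 10
    · rw [if_pos hc]
      have e1 : pvStepB (done, none) cur = (done, some cur) := by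
        simp only [pvStepB]
        rw [if_neg (by omega)]
      have h1 : List.foldl pvStepB (done, none) (cur :: r :: rs)
          = List.foldl pvStepB (done, none) ((cur ++ [' '] ++ r) :: rs) := by
        rw [List.foldl_cons, e1, List.foldl_cons, List.foldl_cons,
          show pvStepB (done, some cur) r = pvStepB (done, none) (cur ++ [' '] ++ r) from rfl]
      rw [h1]
      exact ih done (cur ++ [' '] ++ r)
    · rw [if_neg hc]
      have e1 : pvStepB (done, none) cur = (done ++ [cur], none) := by
        simp only [pvStepB]
        rw [if_pos (by omega)]
      have h1 : List.foldl pvStepB (done, none) (cur :: r :: rs)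
          = List.foldl pvStepB (done ++ [cur], none) (r :: rs) := by
        rw [List.foldl_cons, e1]
      rw [h1]
      exact ih (done ++ [cur]) r

lemma pv_merge_eq (chunks : List (List Char)) : pvMergeA chunks 0 = pvMergeB chunks := by
  cases chunks with
  | nil => rw [pvMergeA]; rfl
  | cons c rest =>
    have h0 := pv_mergeA_eq_core rest [] c
    simp only [List.nil_append, List.length_nil] at h0
    rw [h0, pv_core_eq_fold]
    rfl

-- ===== VERDICT (by name: the statement is the Claim_ definition above) =====
theorem split_solution_into_chunks_spec : Claim_equal_split_solution_into_chunks := by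
  intro s _
  unfold Spec_split_solution_into_chunks split_solution_into_chunks split_solution_into_chunks_alt
  show (pvMergeA (pvScanA (pvPreA s.toList) 0 [] []) 0).map String.ofList
      = (pvMergeB (pvSplitB (pvPreB s.toList))).map String.ofList
  have hpre : pvPreA = pvPreB := rfl
  rw [hpre]
  have hscan : pvScanA (pvPreB s.toList) 0 [] [] = pvSplitB (pvPreB s.toList) := by
    rw [pv_splitB_eq_bgo]
    simpa using pv_scanA_eq_bgo (pvPreB s.toList) (pvPreB s.toList).length 0 0 [] []
      rfl (Nat.le_refl 0) (Nat.zero_le _) (by simp)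
  rw [hscan, pv_merge_eq]
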